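-- pv_equiv track=rewrite | github.com/safmy/FinanceCompare | api/multiline_pdf_processor.py | categorize_transaction
-- ===== SOURCE A (Python) =====
-- def categorize_transaction(description):
--     """Categorize transaction based on description"""
--     desc_upper = description.upper()
--
--     # Income
--     if any(pattern in desc_upper for pattern in [
--         'CHILD BENEFIT', 'WEEKLY SUBSISTENCE', 'GIFT', 'SALARY',
--         'PAYMENT THANK YOU', 'PAYMENT RECEIVED', 'CR PAYMENT', 'PAYSTREAM'
--     ]):
--         return 'Income'
--
--     # Rent
--     if 'RENT' in desc_upper:
--         return 'Rent'
--
--     # Financial Services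
--     if any(pattern in desc_upper for pattern in ['HSBC', 'LOAN', 'PAYPAL', 'ATM', 'BANK']):
--         return 'Financial Services'
--
--     # Bills & Utilities
--     if any(pattern in desc_upper for pattern in ['DD EE', 'DDEE', 'ELECTRIC', 'GAS', 'WATER', 'EE LIMITED']):
--         return 'Bills & Utilities'
--
--     # Groceries
--     if any(pattern in desc_upper for pattern in [
--         'SAINSBURY', 'TESCO', 'ASDA', 'BUDGENS', 'CO-OP', 'ALDI', 'LIDL', 'WAITROSE', 'MORRISONS'
--     ]):
--         return 'Groceries'
--
--     # Transport
--     if any(pattern in desc_upper for pattern in ['TFL', 'UBER', 'TAXI', 'TRAIN', 'RAIL', 'OYSTER']):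
--         return 'Transport'
--
--     # Fast Food
--     if any(pattern in desc_upper for pattern in ['GREGGS', 'MCDONALD', 'KFC', 'SUBWAY', 'BURGER', 'PIZZA HUT']):
--         return 'Fast Food'
--
--     # Coffee Shops
--     if any(pattern in desc_upper for pattern in ['CAFFE NERO', 'STARBUCKS', 'COSTA', 'PRET A MANGER']):
--         return 'Coffee Shops'
--
--     # Shopping
--     if any(pattern in desc_upper for pattern in [
--         'AMAZON', 'PRIMARK', 'T K MAXX', 'TK MAXX', 'H & M', 'H&M', 'BOOTS',
--         'HOLLAND & BARRETT', 'APPLE.COM', 'GOOGLE', 'AUDIBLE', 'IKEA', 'ARGOS',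
--         'B & Q', 'B&Q', 'JOHN LEWIS', 'NEXT', 'ZARA'
--     ]):
--         return 'Shopping'
--
--     # Entertainment/Subscriptions
--     if any(pattern in desc_upper for pattern in [
--         'LITTLE GYM', 'CINEMA', 'EVERYONE ACTIVE', 'NETFLIX', 'SPOTIFY', 'GYM',
--         'PLAYSTATION', 'XBOX', 'NINTENDO'
--     ]):
--         return 'Entertainment'
--
--     # Restaurants
--     if any(pattern in desc_upper for pattern in ['NANDO', 'WAGAMAMA', 'PIZZA EXPRESS', 'RESTAURANT']):
--         return 'Restaurants'
--
--     # Healthcare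
--     if any(pattern in desc_upper for pattern in ['PHARMA', 'CHEMIST', 'MEDICAL', 'DOCTOR', 'DENTAL']):
--         return 'Healthcare'
--
--     # Food Delivery
--     if any(pattern in desc_upper for pattern in ['DELIVEROO', 'JUST EAT', 'UBER EATS']):
--         return 'Food Delivery'
--
--     return 'Other'
-- ===== SOURCE B (Python) =====
-- CATEGORIES = [
--     ('Income', ['CHILD BENEFIT', 'WEEKLY SUBSISTENCE', 'GIFT', 'SALARY',
--                 'PAYMENT THANK YOU', 'PAYMENT RECEIVED', 'CR PAYMENT', 'PAYSTREAM']),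
--     ('Rent', ['RENT']),
--     ('Financial Services', ['HSBC', 'LOAN', 'PAYPAL', 'ATM', 'BANK']),
--     ('Bills & Utilities', ['DD EE', 'DDEE', 'ELECTRIC', 'GAS', 'WATER', 'EE LIMITED']),
--     ('Groceries', ['SAINSBURY', 'TESCO', 'ASDA', 'BUDGENS', 'CO-OP', 'ALDI', 'LIDL',
--                    'WAITROSE', 'MORRISONS']),
--     ('Transport', ['TFL', 'UBER', 'TAXI', 'TRAIN', 'RAIL', 'OYSTER']),
--     ('Fast Food', ['GREGGS', 'MCDONALD', 'KFC', 'SUBWAY', 'BURGER', 'PIZZA HUT']),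
--     ('Coffee Shops', ['CAFFE NERO', 'STARBUCKS', 'COSTA', 'PRET A MANGER']),
--     ('Shopping', ['AMAZON', 'PRIMARK', 'T K MAXX', 'TK MAXX', 'H & M', 'H&M', 'BOOTS',
--                   'HOLLAND & BARRETT', 'APPLE.COM', 'GOOGLE', 'AUDIBLE', 'IKEA', 'ARGOS',
--                   'B & Q', 'B&Q', 'JOHN LEWIS', 'NEXT', 'ZARA']),
--     ('Entertainment', ['LITTLE GYM', 'CINEMA', 'EVERYONE ACTIVE', 'NETFLIX', 'SPOTIFY',
--                        'GYM', 'PLAYSTATION', 'XBOX', 'NINTENDO']),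
--     ('Restaurants', ['NANDO', 'WAGAMAMA', 'PIZZA EXPRESS', 'RESTAURANT']),
--     ('Healthcare', ['PHARMA', 'CHEMIST', 'MEDICAL', 'DOCTOR', 'DENTAL']),
--     ('Food Delivery', ['DELIVEROO', 'JUST EAT', 'UBER EATS']),
-- ]
--
-- # One flat pattern->priority list and one label array, built once at import time.
-- PATTERNS = [(p, k) for k, (_label, pats) in enumerate(CATEGORIES) for p in pats]
-- LABELS = [label for label, _pats in CATEGORIES]
--
--
-- def categorize_transaction(description):
--     """Categorize transaction: lowest matched priority over a flat pattern list."""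
--     d = description.upper()
--     best = len(CATEGORIES)
--     for pat, k in PATTERNS:
--         if pat in d:
--             best = min(best, k)
--     return LABELS[best] if best < len(CATEGORIES) else 'Other'
-- ===== Notes on version B (the rewrite author's own statement) =====
-- stated objective: alternative
-- what changed: Instead of A's thirteen ordered if-blocks with early return, B flattens all patterns into one (pattern, priority) list, makes a single exhaustive pass accumulating the minimum matched priority, and indexes a label array at the end (priority order makes this equal to first-match).
import Mathlib
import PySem

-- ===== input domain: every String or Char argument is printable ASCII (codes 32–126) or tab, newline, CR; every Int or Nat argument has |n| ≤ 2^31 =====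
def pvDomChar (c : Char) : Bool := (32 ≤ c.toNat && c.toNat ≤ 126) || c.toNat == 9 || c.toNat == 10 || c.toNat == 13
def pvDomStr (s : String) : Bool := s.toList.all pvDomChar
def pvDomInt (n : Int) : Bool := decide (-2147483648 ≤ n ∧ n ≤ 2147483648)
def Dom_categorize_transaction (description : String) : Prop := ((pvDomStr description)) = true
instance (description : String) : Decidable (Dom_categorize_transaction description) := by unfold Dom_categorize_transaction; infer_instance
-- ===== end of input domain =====

-- B replaces A's thirteen ordered if-blocks (early return) by one exhaustive pass over a flat
-- (pattern, priority) list accumulating the minimum matched priority, then a label-array lookup.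

-- ===== PORT A =====
def categorize_transaction (description : String) : String :=
  let desc_upper := PySem.Str.upper description
  if (["CHILD BENEFIT", "WEEKLY SUBSISTENCE", "GIFT", "SALARY",
       "PAYMENT THANK YOU", "PAYMENT RECEIVED", "CR PAYMENT", "PAYSTREAM"].any
        (fun pattern => PySem.Str.isIn pattern desc_upper)) then "Income"
  else if PySem.Str.isIn "RENT" desc_upper then "Rent"
  else if (["HSBC", "LOAN", "PAYPAL", "ATM", "BANK"].any
        (fun pattern => PySem.Str.isIn pattern desc_upper)) then "Financial Services"
  else if (["DD EE", "DDEE", "ELECTRIC", "GAS", "WATER", "EE LIMITED"].any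
        (fun pattern => PySem.Str.isIn pattern desc_upper)) then "Bills & Utilities"
  else if (["SAINSBURY", "TESCO", "ASDA", "BUDGENS", "CO-OP", "ALDI", "LIDL",
            "WAITROSE", "MORRISONS"].any
        (fun pattern => PySem.Str.isIn pattern desc_upper)) then "Groceries"
  else if (["TFL", "UBER", "TAXI", "TRAIN", "RAIL", "OYSTER"].any
        (fun pattern => PySem.Str.isIn pattern desc_upper)) then "Transport"
  else if (["GREGGS", "MCDONALD", "KFC", "SUBWAY", "BURGER", "PIZZA HUT"].any
        (fun pattern => PySem.Str.isIn pattern desc_upper)) then "Fast Food"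
  else if (["CAFFE NERO", "STARBUCKS", "COSTA", "PRET A MANGER"].any
        (fun pattern => PySem.Str.isIn pattern desc_upper)) then "Coffee Shops"
  else if (["AMAZON", "PRIMARK", "T K MAXX", "TK MAXX", "H & M", "H&M", "BOOTS",
            "HOLLAND & BARRETT", "APPLE.COM", "GOOGLE", "AUDIBLE", "IKEA", "ARGOS",
            "B & Q", "B&Q", "JOHN LEWIS", "NEXT", "ZARA"].any
        (fun pattern => PySem.Str.isIn pattern desc_upper)) then "Shopping"
  else if (["LITTLE GYM", "CINEMA", "EVERYONE ACTIVE", "NETFLIX", "SPOTIFY",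
            "GYM", "PLAYSTATION", "XBOX", "NINTENDO"].any
        (fun pattern => PySem.Str.isIn pattern desc_upper)) then "Entertainment"
  else if (["NANDO", "WAGAMAMA", "PIZZA EXPRESS", "RESTAURANT"].any
        (fun pattern => PySem.Str.isIn pattern desc_upper)) then "Restaurants"
  else if (["PHARMA", "CHEMIST", "MEDICAL", "DOCTOR", "DENTAL"].any
        (fun pattern => PySem.Str.isIn pattern desc_upper)) then "Healthcare"
  else if (["DELIVEROO", "JUST EAT", "UBER EATS"].any
        (fun pattern => PySem.Str.isIn pattern desc_upper)) then "Food Delivery"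
  else "Other"

-- ===== PORT B =====
def pvCategories : List (String × List String) :=
  [("Income", ["CHILD BENEFIT", "WEEKLY SUBSISTENCE", "GIFT", "SALARY",
               "PAYMENT THANK YOU", "PAYMENT RECEIVED", "CR PAYMENT", "PAYSTREAM"]),
   ("Rent", ["RENT"]),
   ("Financial Services", ["HSBC", "LOAN", "PAYPAL", "ATM", "BANK"]),
   ("Bills & Utilities", ["DD EE", "DDEE", "ELECTRIC", "GAS", "WATER", "EE LIMITED"]),
   ("Groceries", ["SAINSBURY", "TESCO", "ASDA", "BUDGENS", "CO-OP", "ALDI", "LIDL",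
                  "WAITROSE", "MORRISONS"]),
   ("Transport", ["TFL", "UBER", "TAXI", "TRAIN", "RAIL", "OYSTER"]),
   ("Fast Food", ["GREGGS", "MCDONALD", "KFC", "SUBWAY", "BURGER", "PIZZA HUT"]),
   ("Coffee Shops", ["CAFFE NERO", "STARBUCKS", "COSTA", "PRET A MANGER"]),
   ("Shopping", ["AMAZON", "PRIMARK", "T K MAXX", "TK MAXX", "H & M", "H&M", "BOOTS",
                 "HOLLAND & BARRETT", "APPLE.COM", "GOOGLE", "AUDIBLE", "IKEA", "ARGOS",
                 "B & Q", "B&Q", "JOHN LEWIS", "NEXT", "ZARA"]),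
   ("Entertainment", ["LITTLE GYM", "CINEMA", "EVERYONE ACTIVE", "NETFLIX", "SPOTIFY",
                      "GYM", "PLAYSTATION", "XBOX", "NINTENDO"]),
   ("Restaurants", ["NANDO", "WAGAMAMA", "PIZZA EXPRESS", "RESTAURANT"]),
   ("Healthcare", ["PHARMA", "CHEMIST", "MEDICAL", "DOCTOR", "DENTAL"]),
   ("Food Delivery", ["DELIVEROO", "JUST EAT", "UBER EATS"])]

-- hand port of Python's enumerate (used by the PATTERNS comprehension), exact
def pvEnumFrom {α : Type} (n : Nat) : List α → List (Nat × α)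
  | [] => []
  | x :: xs => (n, x) :: pvEnumFrom (n + 1) xs

-- PATTERNS = [(p, k) for k, (_label, pats) in enumerate(CATEGORIES) for p in pats]
def pvPatterns : List (String × Nat) :=
  (pvEnumFrom 0 pvCategories).flatMap (fun kc => kc.2.2.map (fun p => (p, kc.1)))

-- LABELS = [label for label, _pats in CATEGORIES]
def pvLabels : List String := pvCategories.map Prod.fst

def categorize_transaction_alt (description : String) : String :=
  let d := PySem.Str.upper description
  let best := pvPatterns.foldl
    (fun best pk => if PySem.Str.isIn pk.1 d then min best pk.2 else best)
    pvCategories.length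
  if best < pvCategories.length then pvLabels.getD best "Other" else "Other"

-- ===== PRECONDITION & SPEC =====
def Spec_categorize_transaction (description : String) (out : String) : Prop := out = categorize_transaction_alt description
instance (description : String) (out : String) : Decidable (Spec_categorize_transaction description out) := by unfold Spec_categorize_transaction; infer_instance

-- ===== CLAIM (what is proved, stated in full; the proofs are below) =====
def Claim_equal_categorize_transaction : Prop := ∀ (description : String), Dom_categorize_transaction description → Spec_categorize_transaction description (categorize_transaction description)

-- ===== LEMMAS AND PROOFS =====

-- whether a category matches the (already uppercased) description
def pvCatM (d : String) (c : String × List String) : Bool :=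
  c.2.any (fun p => PySem.Str.isIn p d)

-- index of the first matching category
def pvFirstIdx (d : String) : List (String × List String) → Option Nat
  | [] => none
  | c :: rest => if pvCatM d c then some 0 else (pvFirstIdx d rest).map (· + 1)

-- first-match scan (A's if-chain, abstractly)
def pvScan (d : String) : List (String × List String) → String
  | [] => "Other"
  | c :: rest => if pvCatM d c then c.1 else pvScan d rest

def pvStep (d : String) (best : Nat) (pk : String × Nat) : Nat :=
  if PySem.Str.isIn pk.1 d then min best pk.2 else best

theorem pv_fold_pats (d : String) (pats : List String) (k b : Nat) :
    (pats.map (fun p => (p, k))).foldl (pvStep d) b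
      = if pats.any (fun p => PySem.Str.isIn p d) then min b k else b := by
  induction pats generalizing b with
  | nil => simp
  | cons p ps ih =>
    rw [List.map_cons, List.foldl_cons, ih, List.any_cons]
    cases h1 : PySem.Str.isIn p d
    · have hstep : pvStep d b (p, k) = b := by
        simp only [pvStep, h1, Bool.false_eq_true, if_false]
      rw [hstep, Bool.false_or]
    · have hstep : pvStep d b (p, k) = min b k := by
        simp only [pvStep, h1, eq_self_iff_true, if_true]
      rw [hstep]
      simp only [Bool.true_or, eq_self_iff_true, if_true]
      split_ifs <;> omega

theorem pv_fold_flat (d : String) (cats : List (String × List String)) (n b : Nat) :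
    ((pvEnumFrom n cats).flatMap (fun kc => kc.2.2.map (fun p => (p, kc.1)))).foldl (pvStep d) b
      = match pvFirstIdx d cats with
        | some j => min b (n + j)
        | none => b := by
  induction cats generalizing n b with
  | nil => simp [pvEnumFrom, pvFirstIdx]
  | cons c rest ih =>
    simp only [pvEnumFrom, List.flatMap_cons, List.foldl_append, pv_fold_pats]
    by_cases hm : (c.2.any fun p => PySem.Str.isIn p d) = true
    · have hfi : pvFirstIdx d (c :: rest) = some 0 := by
        simp only [pvFirstIdx, pvCatM, hm, eq_self_iff_true, if_true]
      rw [if_pos hm, ih, hfi]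
      cases hr : pvFirstIdx d rest with
      | none => show min b n = min b (n + 0); omega
      | some j => show min (min b n) (n + 1 + j) = min b (n + 0); omega
    · have hmf : (c.2.any fun p => PySem.Str.isIn p d) = false := by
        simpa using hm
      have hfi : pvFirstIdx d (c :: rest) = (pvFirstIdx d rest).map (· + 1) := by
        simp only [pvFirstIdx, pvCatM, hmf, Bool.false_eq_true, if_false]
      rw [if_neg hm, ih, hfi]
      cases hr : pvFirstIdx d rest with
      | none => rfl
      | some j => show min b (n + 1 + j) = min b (n + (j + 1)); omega

theorem pv_firstIdx_lt (d : String) (cats : List (String × List String)) (j : Nat)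
    (h : pvFirstIdx d cats = some j) : j < cats.length := by
  induction cats generalizing j with
  | nil => simp [pvFirstIdx] at h
  | cons c rest ih =>
    simp only [pvFirstIdx] at h
    by_cases hm : pvCatM d c = true
    · simp [hm] at h
      simp only [List.length_cons]
      omega
    · simp [hm] at h
      cases hr : pvFirstIdx d rest with
      | none => simp [hr] at h
      | some j' =>
        simp [hr] at h
        have := ih j' hr
        simp only [List.length_cons]
        omega

theorem pv_label_of_firstIdx (d : String) (cats : List (String × List String)) :
    (match pvFirstIdx d cats with
      | some j => (cats.map Prod.fst).getD j "Other"
      | none => "Other") = pvScan d cats := by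
  induction cats with
  | nil => simp [pvFirstIdx, pvScan]
  | cons c rest ih =>
    by_cases hm : pvCatM d c = true
    · simp [pvFirstIdx, pvScan, hm]
    · cases hr : pvFirstIdx d rest <;>
        simp_all [pvFirstIdx, pvScan]

theorem pv_alt_eq_scan (description : String) :
    categorize_transaction_alt description
      = pvScan (PySem.Str.upper description) pvCategories := by
  have hstep : (fun (best : Nat) (pk : String × Nat) =>
      if PySem.Str.isIn pk.1 (PySem.Str.upper description) then min best pk.2 else best)
      = pvStep (PySem.Str.upper description) := rfl
  have hf := pv_fold_flat (PySem.Str.upper description) pvCategories 0 pvCategories.length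
  have hl := pv_label_of_firstIdx (PySem.Str.upper description) pvCategories
  have hlen : pvCategories.length = 13 := rfl
  simp only [categorize_transaction_alt, pvPatterns, hstep]
  rw [hf, ← hl]
  cases h : pvFirstIdx (PySem.Str.upper description) pvCategories with
  | none =>
    show (if pvCategories.length < pvCategories.length then
            pvLabels.getD pvCategories.length "Other" else "Other") = "Other"
    simp
  | some j =>
    have hj := pv_firstIdx_lt _ _ _ h
    have hmin : min pvCategories.length (0 + j) = j := by rw [hlen]; rw [hlen] at hj; omega
    show (if min pvCategories.length (0 + j) < pvCategories.length then
            pvLabels.getD (min pvCategories.length (0 + j)) "Other" else "Other")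
        = (pvCategories.map Prod.fst).getD j "Other"
    rw [hmin, if_pos hj]
    rfl

theorem pv_a_eq_scan (description : String) :
    categorize_transaction description
      = pvScan (PySem.Str.upper description) pvCategories := by
  simp only [categorize_transaction, pvCategories, pvScan, pvCatM,
    List.any_cons, List.any_nil, Bool.or_false]

-- ===== VERDICT (by name: the statement is the Claim_ definition above) =====
theorem categorize_transaction_spec : Claim_equal_categorize_transaction := by
  intro description _
  show categorize_transaction description = categorize_transaction_alt description
  rw [pv_a_eq_scan, pv_alt_eq_scan]
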